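-- pv_equiv track=rewrite | github.com/ChanHyukLeee/Study-and-practice | 21.08.12.py | blackjack_hand_greater_than
-- ===== SOURCE A (Python) =====
-- def blackjack_hand_greater_than(hand_1, hand_2):
--     """
--     Return True if hand_1 beats hand_2, and False otherwise.
--
--     In order for hand_1 to beat hand_2 the following must be true:
--     - The total of hand_1 must not exceed 21
--     - The total of hand_1 must exceed the total of hand_2 OR hand_2's total must exceed 21
--
--     Hands are represented as a list of cards. Each card is represented by a string.
--
--     When adding up a hand's total, cards with numbers count for that many points. Face
--     cards ('J', 'Q', and 'K') are worth 10 points. 'A' can count for 1 or 11.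
--
--     When determining a hand's total, you should try to count aces in the way that
--     maximizes the hand's total without going over 21. e.g. the total of ['A', 'A', '9'] is 21,
--     the total of ['A', 'A', '9', '3'] is 14.
--
--     Examples:
--     >>> blackjack_hand_greater_than(['K'], ['3', '4'])
--     True
--     >>> blackjack_hand_greater_than(['K'], ['10'])
--     False
--     >>> blackjack_hand_greater_than(['K', 'K', '2'], ['3'])
--     False
--     """
--     num1 =0
--     num2 =0
--     aces1 = 0
--     aces2 = 0
--     for i in hand_1:
--         if i in ['J', 'Q', 'K']:
--             num1 += 10
--         elif i == 'A':
--             aces1 += 1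
--         else:
--             num1 += int(i)
--     num1 += aces1
--     while num1 + 10 <= 21 and aces1>0 :
--         num1 += 10
--         aces1 -= 1
--
--     for i in hand_2:
--         if i in ['J', 'Q', 'K']:
--             num2 += 10
--         elif i == 'A':
--             aces2 +=1
--         else:
--             num2 += int(i)
--
--     num2 += aces2
--
--     while num2 + 10 <= 21 and aces2 >0:
--         num2 += 10
--         aces2 -= 1
--
--     return (num1 <= 21) and (num1 >= num2 or num2>21)
-- ===== SOURCE B (Python) =====
-- def hand_total(hand):
--     aces = hand.count('A')
--     base = sum(10 if c in ('J', 'Q', 'K') else int(c) for c in hand if c != 'A')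
--     t = base + aces  # every ace counted as 1
--     # promote aces to 11 in closed form: each promotion adds 10, at most
--     # while the running total stays <= 21 after adding 10
--     return t + 10 * min(aces, max(0, (21 - t) // 10))
--
-- def blackjack_hand_greater_than(hand_1, hand_2):
--     t1 = hand_total(hand_1)
--     t2 = hand_total(hand_2)
--     return t1 <= 21 and (t1 >= t2 or t2 > 21)
-- ===== Notes on version B (the rewrite author's own statement) =====
-- stated objective: simpler
-- what changed: Factors the duplicated per-hand code into one hand_total helper and replaces the ace-promotion while loop with a closed-form floor-division formula (no loop).
import Mathlib
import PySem

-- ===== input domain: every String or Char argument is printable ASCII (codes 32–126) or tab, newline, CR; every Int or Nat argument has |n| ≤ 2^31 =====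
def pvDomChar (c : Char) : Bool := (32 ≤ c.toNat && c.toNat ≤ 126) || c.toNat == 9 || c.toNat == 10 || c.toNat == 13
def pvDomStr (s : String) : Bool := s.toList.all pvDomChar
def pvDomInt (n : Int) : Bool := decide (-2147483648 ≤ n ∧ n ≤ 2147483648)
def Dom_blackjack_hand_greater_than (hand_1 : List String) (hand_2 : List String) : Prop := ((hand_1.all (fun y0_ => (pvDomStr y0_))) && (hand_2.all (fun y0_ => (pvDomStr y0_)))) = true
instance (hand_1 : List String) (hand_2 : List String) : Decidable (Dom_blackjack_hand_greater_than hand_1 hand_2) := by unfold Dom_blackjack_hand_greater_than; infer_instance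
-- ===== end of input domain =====

-- B replaces A's duplicated per-hand code and ace-promotion while loop by one
-- hand_total helper with a closed-form floor-division formula (objective: simpler).

-- ===== PORT A =====
-- one step of A's per-hand for loop; none models the ValueError of int(i)
def stepA (acc : Option (Int × Int)) (i : String) : Option (Int × Int) :=
  match acc with
  | none => none
  | some (num, aces) =>
    if i = "J" ∨ i = "Q" ∨ i = "K" then some (num + 10, aces)
    else if i = "A" then some (num, aces + 1)
    else
      match PySem.Int.ofStr? i with
      | some v => some (num + v, aces)
      | none => none

-- A's 'while num + 10 <= 21 and aces > 0' loop
def acesLoopA (num aces : Int) : Int :=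
  if h : num + 10 ≤ 21 ∧ aces > 0 then acesLoopA (num + 10) (aces - 1) else num
termination_by aces.toNat
decreasing_by omega

def blackjack_hand_greater_than (hand_1 : List String) (hand_2 : List String) : Bool :=
  match hand_1.foldl stepA (some (0, 0)), hand_2.foldl stepA (some (0, 0)) with
  | some (n1, a1), some (n2, a2) =>
    let num1 := acesLoopA (n1 + a1) a1
    let num2 := acesLoopA (n2 + a2) a2
    decide (num1 ≤ 21 ∧ (num1 ≥ num2 ∨ num2 > 21))
  | _, _ => false   -- unreachable under Pre_ (Python raises ValueError)

-- ===== PORT B =====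
-- value of a single non-ace card; none models the ValueError of int(c)
def cardVal? (c : String) : Option Int :=
  if c = "J" ∨ c = "Q" ∨ c = "K" then some 10 else PySem.Int.ofStr? c

-- sum(10 if c in ('J','Q','K') else int(c) for c in hand if c != 'A')
def baseSum (hand : List String) : Option Int :=
  hand.foldl (fun acc c =>
    if c = "A" then acc
    else
      match acc with
      | none => none
      | some s =>
        match cardVal? c with
        | none => none
        | some v => some (s + v)) (some 0)

def hand_total (hand : List String) : Option Int :=
  match baseSum hand with
  | none => none
  | some base =>
    let aces : Int := (PySem.List.count hand "A" : Nat)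
    let t := base + aces
    some (t + 10 * min aces (max 0 (PySem.Int.floordiv (21 - t) 10)))

def blackjack_hand_greater_than_alt (hand_1 : List String) (hand_2 : List String) : Bool :=
  match hand_total hand_1 with
  | none => false   -- unreachable under Pre_ (Python raises ValueError)
  | some t1 =>
    match hand_total hand_2 with
    | none => false
    | some t2 => decide (t1 ≤ 21 ∧ (t1 ≥ t2 ∨ t2 > 21))

-- ===== PRECONDITION & SPEC =====
def okCard (c : String) : Bool :=
  c = "J" || c = "Q" || c = "K" || c = "A" || (PySem.Int.ofStr? c).isSome

-- Pre_ excludes exactly the inputs with a card that is neither a face, an ace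
-- nor an int(·)-parsable string, on which Python A raises ValueError.
def Pre_blackjack_hand_greater_than (hand_1 : List String) (hand_2 : List String) : Prop :=
  ((hand_1 ++ hand_2).all okCard) = true

instance (hand_1 : List String) (hand_2 : List String) : Decidable (Pre_blackjack_hand_greater_than hand_1 hand_2) := by
  unfold Pre_blackjack_hand_greater_than; infer_instance

def pvWitness_blackjack_hand_greater_than : List String × List String := (["K"], ["3", "4"])

def Spec_blackjack_hand_greater_than (hand_1 : List String) (hand_2 : List String) (out : Bool) : Prop := out = blackjack_hand_greater_than_alt hand_1 hand_2
instance (hand_1 : List String) (hand_2 : List String) (out : Bool) : Decidable (Spec_blackjack_hand_greater_than hand_1 hand_2 out) := by unfold Spec_blackjack_hand_greater_than; infer_instance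

-- ===== CLAIM (what is proved, stated in full; the proofs are below) =====
def Claim_equal_blackjack_hand_greater_than : Prop := ∀ (hand_1 : List String) (hand_2 : List String), Dom_blackjack_hand_greater_than hand_1 hand_2 → Pre_blackjack_hand_greater_than hand_1 hand_2 → Spec_blackjack_hand_greater_than hand_1 hand_2 (blackjack_hand_greater_than hand_1 hand_2)

-- ===== LEMMAS AND PROOFS =====

-- step of baseSum's fold, named for the lemmas below
def stepS (acc : Option Int) (c : String) : Option Int :=
  if c = "A" then acc
  else
    match acc with
    | none => none
    | some s =>
      match cardVal? c with
      | none => none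
      | some v => some (s + v)

theorem baseSum_eq (hand : List String) : baseSum hand = hand.foldl stepS (some 0) := by
  unfold baseSum stepS; rfl

theorem foldA_none : ∀ (h : List String), h.foldl stepA none = none := by
  intro h; induction h with
  | nil => rfl
  | cons c t ih => simpa [stepA] using ih

theorem foldS_none : ∀ (h : List String), h.foldl stepS none = none := by
  intro h; induction h with
  | nil => rfl
  | cons c t ih => simp only [List.foldl_cons, stepS]; split <;> simp_all

-- A's scan of a hand, in terms of B's non-ace sum and the ace count
theorem scanA_eq : ∀ (h : List String) (n a s : Int),
    h.foldl stepA (some (n, a)) =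
      match h.foldl stepS (some s) with
      | some r => some (n + r - s, a + (PySem.List.count h "A" : Nat))
      | none => none := by
  intro h
  induction h with
  | nil => intro n a s; simp [PySem.List.count]
  | cons c t ih =>
    intro n a s
    simp only [List.foldl_cons]
    by_cases hA : c = "A"
    · rw [show stepA (some (n, a)) c = some (n, a + 1) by simp [stepA, hA],
          show stepS (some s) c = some s by simp [stepS, hA],
          ih n (a + 1) s]
      have : PySem.List.count (c :: t) "A" = PySem.List.count t "A" + 1 := by
        simp [PySem.List.count, hA]
      rw [this]
      cases t.foldl stepS (some s) <;> simp <;> push_cast <;> ring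
    · have hcnt : PySem.List.count (c :: t) "A" = PySem.List.count t "A" := by
        simp [PySem.List.count, hA]
      by_cases hf : c = "J" ∨ c = "Q" ∨ c = "K"
      · rw [show stepA (some (n, a)) c = some (n + 10, a) by simp [stepA, hf],
            show stepS (some s) c = some (s + 10) by simp [stepS, hA, cardVal?, hf],
            ih (n + 10) a (s + 10), hcnt]
        cases t.foldl stepS (some (s + 10)) <;> simp <;> ring_nf
      · cases hv : PySem.Int.ofStr? c with
        | some v =>
          rw [show stepA (some (n, a)) c = some (n + v, a) by simp [stepA, hf, hA, hv],
              show stepS (some s) c = some (s + v) by simp [stepS, hA, cardVal?, hf, hv],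
              ih (n + v) a (s + v), hcnt]
          cases t.foldl stepS (some (s + v)) <;> simp <;> ring_nf
        | none =>
          rw [show stepA (some (n, a)) c = none by simp [stepA, hf, hA, hv],
              show stepS (some s) c = none by simp [stepS, hA, cardVal?, hf, hv],
              foldA_none, foldS_none]

-- A's while loop in closed form
theorem acesLoopA_closed : ∀ (num aces : Int), 0 ≤ aces →
    acesLoopA num aces = num + 10 * min aces (max 0 (PySem.Int.floordiv (21 - num) 10)) := by
  intro num aces
  induction num, aces using acesLoopA.induct with
  | case1 num aces h ih =>
    intro ha
    rw [acesLoopA, dif_pos h, ih (by omega)]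
    set m := PySem.Int.floordiv (21 - (num + 10)) 10 with hm
    set M := PySem.Int.floordiv (21 - num) 10 with hM
    have hm1 : m * 10 ≤ 21 - (num + 10) :=
      (PySem.Int.le_floordiv_iff_mul_le (by omega)).mp (le_of_eq hm)
    have hm2 : 21 - (num + 10) < (m + 1) * 10 :=
      (PySem.Int.floordiv_lt_iff_lt_mul (by omega)).mp (by omega)
    have hM1 : M * 10 ≤ 21 - num :=
      (PySem.Int.le_floordiv_iff_mul_le (by omega)).mp (le_of_eq hM)
    have hM2 : 21 - num < (M + 1) * 10 :=
      (PySem.Int.floordiv_lt_iff_lt_mul (by omega)).mp (by omega)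
    have hMm : M = m + 1 := by nlinarith
    rw [hMm]
    have hm0 : 0 ≤ m := by nlinarith [h.1]
    omega
  | case2 num aces h =>
    intro ha
    rw [acesLoopA, dif_neg h]
    set M := PySem.Int.floordiv (21 - num) 10 with hM
    have hM1 : M * 10 ≤ 21 - num :=
      (PySem.Int.le_floordiv_iff_mul_le (by omega)).mp (le_of_eq hM)
    by_cases hn : num ≤ 11
    · have haz : aces = 0 := by
        by_contra hne
        exact h ⟨by omega, by omega⟩
      omega
    · have : M ≤ 0 := by nlinarith
      omega

-- ===== VERDICT (by name: the statement is the Claim_ definition above) =====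
theorem blackjack_hand_greater_than_spec : Claim_equal_blackjack_hand_greater_than := by
  intro hand_1 hand_2 _ hpre
  unfold Spec_blackjack_hand_greater_than
  unfold blackjack_hand_greater_than blackjack_hand_greater_than_alt hand_total
  rw [baseSum_eq, baseSum_eq, scanA_eq hand_1 0 0 0, scanA_eq hand_2 0 0 0]
  cases h1 : hand_1.foldl stepS (some 0) with
  | none => rfl
  | some r1 =>
    cases h2 : hand_2.foldl stepS (some 0) with
    | none => rfl
    | some r2 =>
      simp only []
      rw [acesLoopA_closed _ _ (by positivity), acesLoopA_closed _ _ (by positivity)]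
      norm_num
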